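-- pv_equiv track=rewrite | github.com/michelprojets/Ensimag-TPs-S1 | BPI/partiel_mi_semestre_2016/test/iterateurs.py | couples
-- ===== SOURCE A (Python) =====
-- def couples(iterable):
--     """
--     renvoie un itérateur qui itère sur chaque couple d'éléments
--     successifs de l'itérable passé en paramètre
--     """
--     if len(iterable) <= 1:
--         return
--     prec = iterable[0]
--     premier = prec  # tuple est non mutable donc pas de partage de référence
--     for index, elem in enumerate(iterable):
--         if index != 0:  # pour sauter le premier cas
--             yield (prec, elem)
--             prec = elem
--     yield (prec, premier)
-- ===== SOURCE B (Python) =====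
-- def couples(iterable):
--     """
--     renvoie un itérateur qui itère sur chaque couple d'éléments
--     successifs de l'itérable passé en paramètre
--     """
--     if len(iterable) <= 1:
--         return
--     shifted = iterable[1:] + iterable[:1]
--     yield from zip(iterable, shifted)
-- ===== Notes on version B (the rewrite author's own statement) =====
-- stated objective: idiomatic
-- what changed: replaces the stateful prec-tracking loop with its separate final wrap-around yield by a single zip of the sequence against its one-step rotation (iterable[1:] + iterable[:1])
import Mathlib
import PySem

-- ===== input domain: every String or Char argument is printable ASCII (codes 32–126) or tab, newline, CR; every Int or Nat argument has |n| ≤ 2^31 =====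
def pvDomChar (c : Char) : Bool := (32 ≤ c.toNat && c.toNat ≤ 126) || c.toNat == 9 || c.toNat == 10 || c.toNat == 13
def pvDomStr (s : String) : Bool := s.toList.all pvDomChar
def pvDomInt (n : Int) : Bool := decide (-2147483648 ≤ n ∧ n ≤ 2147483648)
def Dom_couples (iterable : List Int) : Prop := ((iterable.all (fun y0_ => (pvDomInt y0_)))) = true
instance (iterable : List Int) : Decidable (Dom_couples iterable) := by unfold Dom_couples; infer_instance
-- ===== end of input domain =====

-- B replaces A's stateful prec-tracking loop (and its separate wrap-around yield)
-- by zipping the sequence with its one-step rotation; same O(n) cost, more idiomatic.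
-- Both Pythons are generators; equivalence is about the produced sequence of pairs.

-- ===== PORT A =====
-- the loop body: for index, elem in enumerate(iterable): if index != 0: yield (prec, elem); prec = elem
def couplesStep (s : Int × List (Int × Int)) (ie : Int × Int) : Int × List (Int × Int) :=
  if ie.1 ≠ 0 then (ie.2, s.2 ++ [(s.1, ie.2)]) else s

def couples (iterable : List Int) : List (Int × Int) :=
  if iterable.length ≤ 1 then []
  else
    match iterable with
    | [] => []
    | x :: _ =>            -- prec = iterable[0]; premier = prec (guard ensures non-empty)
      let st := (PySem.List.enumerate iterable 0).foldl couplesStep (x, [])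
      st.2 ++ [(st.1, x)]  -- yield (prec, premier)

-- ===== PORT B =====
def couples_alt (iterable : List Int) : List (Int × Int) :=
  if iterable.length ≤ 1 then []
  else
    let shifted := PySem.List.slice iterable (some 1) none ++ PySem.List.slice iterable none (some 1)
    iterable.zip shifted

-- ===== PRECONDITION & SPEC =====
def Spec_couples (iterable : List Int) (out : List (Int × Int)) : Prop := out = couples_alt iterable
instance (iterable : List Int) (out : List (Int × Int)) : Decidable (Spec_couples iterable out) := by unfold Spec_couples; infer_instance

-- ===== CLAIM (what is proved, stated in full; the proofs are below) =====
def Claim_equal_couples : Prop := ∀ (iterable : List Int), Dom_couples iterable → Spec_couples iterable (couples iterable)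

-- ===== LEMMAS AND PROOFS =====

-- A's loop over the tail (enumeration indices ≥ 1, so the 'index != 0' guard always fires)
theorem couples_loop_eq (rest : List Int) : ∀ (i : Int) (prec : Int) (acc : List (Int × Int)),
    1 ≤ i →
    (PySem.List.enumerate rest i).foldl couplesStep (prec, acc) =
      (rest.getLastD prec, acc ++ (prec :: rest).zip rest) := by
  induction rest with
  | nil => intro i prec acc _; simp [PySem.List.enumerate_nil]
  | cons e t ih =>
      intro i prec acc hi
      rw [PySem.List.enumerate_cons, List.foldl_cons]
      have hstep : couplesStep (prec, acc) (i, e) = (e, acc ++ [(prec, e)]) := by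
        simp [couplesStep]; omega
      rw [hstep, ih (i + 1) e (acc ++ [(prec, e)]) (by omega)]
      rw [List.getLastD_cons]
      simp [List.zip_cons_cons]

-- zipping against the rotation = zipping against the tail, plus the wrap-around pair
theorem zip_rot (rest : List Int) : ∀ (prec x : Int),
    (prec :: rest).zip (rest ++ [x]) = (prec :: rest).zip rest ++ [(rest.getLastD prec, x)] := by
  induction rest with
  | nil => intro prec x; simp
  | cons e t ih =>
      intro prec x
      simp only [List.cons_append, List.zip_cons_cons, ih e x, List.getLastD_cons]

-- ===== VERDICT (by name: the statement is the Claim_ definition above) =====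
theorem couples_spec : Claim_equal_couples := by
  intro iterable _
  unfold Spec_couples couples couples_alt
  match iterable with
  | [] => simp
  | [x] => simp
  | x :: y :: t =>
      rw [if_neg (by simp), if_neg (by simp)]
      have hstep : couplesStep (x, ([] : List (Int × Int))) (0, x) = (x, []) := by
        simp [couplesStep]
      show (List.foldl couplesStep (x, []) (PySem.List.enumerate (x :: y :: t) 0)).2 ++
          [((List.foldl couplesStep (x, []) (PySem.List.enumerate (x :: y :: t) 0)).1, x)] =
        (x :: y :: t).zip
          (PySem.List.slice (x :: y :: t) (some 1) none ++ PySem.List.slice (x :: y :: t) none (some 1))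
      rw [PySem.List.enumerate_cons, List.foldl_cons, hstep,
          couples_loop_eq (y :: t) (0 + 1) x [] (by omega)]
      have h1 : PySem.List.slice (x :: y :: t) (some 1) none = y :: t := by
        simpa using PySem.List.slice_from_one (x :: y :: t)
      have h2 : PySem.List.slice (x :: y :: t) none (some 1) = [x] := by
        have := PySem.List.slice_to_natCast (x :: y :: t) 1
        simpa using this
      rw [h1, h2, zip_rot]
      simp
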